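-- pv_equiv track=rewrite | github.com/move-geun/baekjoon_py | 프로그래머스/2/389479. 서버 증설 횟수/서버 증설 횟수.py | solution
-- ===== SOURCE A (Python) =====
-- def solution(players, m, k):
--     answer = 0
--     server = [0 for _ in range(len(players))]
--     server_cnt = 0
--     for i in range(len(players)):
--         n = 0
--         if players[i] >= m:
--             n = players[i] // m
--
--             add_server_cnt = 1
--             if server[i] < n:
--
--                 add_server_cnt = n - server[i]
--                 if n * m <= players[i] < (n+1) * m:
--                     server_cnt += add_server_cnt
--                     for j in range(k):
--                         if i + j < len(server):
--                             server[i+j] += add_server_cnt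
--
--                         else:
--                             break
--
--     return server_cnt
-- ===== SOURCE B (Python) =====
-- def solution(players, m, k):
--     # Difference-array version: coverage expires via diff[i+k], O(n+k) instead of O(n*k).
--     cnt = 0
--     cur = 0
--     diff = [0] * (len(players) + 1)
--     for i, p in enumerate(players):
--         cur += diff[i]
--         if p >= m:
--             need = p // m
--             if cur < need and need * m <= p < (need + 1) * m:
--                 add = need - cur
--                 cnt += add
--                 if k > 0:
--                     cur += add
--                     if i + k < len(diff):
--                         diff[i + k] -= add
--     return cnt
-- ===== Notes on version B (the rewrite author's own statement) =====
-- stated objective: faster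
-- what changed: Replaces A's per-event inner loop that adds the increment to up to k consecutive server slots with a difference array plus a running accumulator, so each scaling event is O(1) instead of O(k).
import Mathlib
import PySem

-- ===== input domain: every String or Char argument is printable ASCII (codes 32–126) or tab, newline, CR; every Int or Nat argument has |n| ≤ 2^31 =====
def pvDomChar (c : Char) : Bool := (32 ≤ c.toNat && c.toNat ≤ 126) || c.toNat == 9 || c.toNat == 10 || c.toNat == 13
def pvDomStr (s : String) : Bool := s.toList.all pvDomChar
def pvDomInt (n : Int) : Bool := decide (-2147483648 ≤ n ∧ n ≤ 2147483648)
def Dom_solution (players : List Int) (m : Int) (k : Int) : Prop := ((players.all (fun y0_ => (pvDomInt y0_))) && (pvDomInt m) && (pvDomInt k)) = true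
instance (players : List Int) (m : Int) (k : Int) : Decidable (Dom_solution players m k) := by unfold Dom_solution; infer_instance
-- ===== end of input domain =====

-- B replaces A's O(n*k) inner range-update loop by a difference array with a running
-- accumulator; the per-step scaling decision is unchanged.

-- ===== PORT A =====
-- inner loop of A: for j in range(k): if i+j < len(server): server[i+j] += add, else break
def aInner (server : List Int) (i : Int) (js : List Int) (add : Int) : List Int :=
  match js with
  | [] => server
  | j :: rest =>
      if i + j < (server.length : Int) then
        aInner (PySem.List.pySetD server (i + j) (PySem.List.pyGetD server (i + j) 0 + add)) i rest add
      else server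

-- outer loop of A: for i in range(len(players)), state (server, server_cnt)
def aLoop (players : List Int) (m : Int) (k : Int) (is_ : List Int) (server : List Int) (cnt : Int) : Int :=
  match is_ with
  | [] => cnt
  | i :: rest =>
      let p := PySem.List.pyGetD players i 0
      if m ≤ p then
        let n := PySem.Int.floordiv p m
        if PySem.List.pyGetD server i 0 < n then
          let add := n - PySem.List.pyGetD server i 0
          if n * m ≤ p ∧ p < (n + 1) * m then
            aLoop players m k rest (aInner server i (PySem.List.pyRange 0 k 1) add) (cnt + add)
          else aLoop players m k rest server cnt
        else aLoop players m k rest server cnt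
      else aLoop players m k rest server cnt

def solution (players : List Int) (m : Int) (k : Int) : Int :=
  aLoop players m k (PySem.List.pyRange 0 (players.length : Int) 1)
    (List.replicate players.length 0) 0

-- ===== PORT B =====
-- B's loop: for i, p in enumerate(players), state (diff, cur, cnt)
def bLoop (m : Int) (k : Int) (items : List (Int × Int)) (diff : List Int) (cur cnt : Int) : Int :=
  match items with
  | [] => cnt
  | (i, p) :: rest =>
      let cur1 := cur + PySem.List.pyGetD diff i 0
      if m ≤ p then
        let need := PySem.Int.floordiv p m
        if cur1 < need ∧ need * m ≤ p ∧ p < (need + 1) * m then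
          let add := need - cur1
          if 0 < k then
            if i + k < (diff.length : Int) then
              bLoop m k rest (PySem.List.pySetD diff (i + k) (PySem.List.pyGetD diff (i + k) 0 - add)) (cur1 + add) (cnt + add)
            else bLoop m k rest diff (cur1 + add) (cnt + add)
          else bLoop m k rest diff cur1 (cnt + add)
        else bLoop m k rest diff cur1 cnt
      else bLoop m k rest diff cur1 cnt

def solution_alt (players : List Int) (m : Int) (k : Int) : Int :=
  bLoop m k (PySem.List.enumerate players 0) (List.replicate (players.length + 1) 0) 0 0

-- ===== PRECONDITION & SPEC =====
-- Pre_ excludes exactly the inputs on which Python A raises ZeroDivisionError: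
-- m = 0 together with some player value ≥ 0 (players[i] >= m then triggers players[i] // 0).
def Pre_solution (players : List Int) (m : Int) (k : Int) : Prop :=
  m ≠ 0 ∨ ∀ p ∈ players, p < 0
instance (players : List Int) (m : Int) (k : Int) : Decidable (Pre_solution players m k) := by
  unfold Pre_solution; infer_instance
def pvWitness_solution : List Int × Int × Int := ([10, 3, 0], 3, 2)
def Spec_solution (players : List Int) (m : Int) (k : Int) (out : Int) : Prop := out = solution_alt players m k
instance (players : List Int) (m : Int) (k : Int) (out : Int) : Decidable (Spec_solution players m k out) := by unfold Spec_solution; infer_instance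

-- ===== CLAIM (what is proved, stated in full; the proofs are below) =====
def Claim_equal_solution : Prop := ∀ (players : List Int) (m : Int) (k : Int), Dom_solution players m k → Pre_solution players m k → Spec_solution players m k (solution players m k)

-- ===== LEMMAS AND PROOFS =====

lemma sum_take_set (l : List Int) (p t : Nat) (v : Int) (hp : p < l.length) :
    ((l.set p v).take t).sum = (l.take t).sum + (if p < t then v - l.getD p 0 else 0) := by
  induction l generalizing p t with
  | nil => simp at hp
  | cons x xs ih =>
    cases p with
    | zero =>
      cases t with
      | zero => simp
      | succ t' => simp [List.getD_eq_getElem?_getD]; ring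
    | succ p' =>
      cases t with
      | zero => simp
      | succ t' =>
        simp only [List.set_cons_succ, List.take_succ_cons, List.sum_cons,
          List.getD_eq_getElem?_getD, List.getElem?_cons_succ]
        have := ih p' t' (by simpa using hp)
        simp [List.getD_eq_getElem?_getD] at this
        rw [this]
        by_cases h : p' < t'
        · simp only [if_pos h, if_pos (by omega : p' + 1 < t' + 1)]; ring
        · simp only [if_neg h, if_neg (by omega : ¬(p' + 1 < t' + 1))]; ring

lemma sum_take_drop_succ (diff : List Int) (s j : Nat) (hs : s < diff.length) (hj : s ≤ j) :
    ((diff.drop s).take (j + 1 - s)).sum = diff.getD s 0 + ((diff.drop (s + 1)).take (j - s)).sum := by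
  rw [List.drop_eq_getElem_cons hs]
  have : j + 1 - s = (j - s) + 1 := by omega
  rw [this, List.take_succ_cons, List.sum_cons, List.getD_eq_getElem?_getD,
    List.getElem?_eq_getElem hs]
  rfl

lemma aInner_spec (add : Int) (i : Nat) : ∀ (fuel : Nat) (c k : Int), 0 ≤ c → (k - c).toNat = fuel →
    ∀ server : List Int,
    (aInner server (i : Int) (PySem.List.pyRange c k 1) add).length = server.length ∧
    ∀ j : Nat, (aInner server (i : Int) (PySem.List.pyRange c k 1) add).getD j 0
      = server.getD j 0 + (if (i : Int) + c ≤ (j : Int) ∧ (j : Int) < (i : Int) + k ∧ j < server.length then add else 0) := by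
  intro fuel
  induction fuel with
  | zero =>
    intro c k hc hf server
    rw [PySem.List.pyRange_one_eq_nil (by omega : k ≤ c)]
    refine ⟨rfl, fun j => ?_⟩
    have : ¬((i : Int) + c ≤ (j : Int) ∧ (j : Int) < (i : Int) + k ∧ j < server.length) := by
      rintro ⟨h1, h2, h3⟩; omega
    simp [aInner, this]
  | succ f ih =>
    intro c k hc hf server
    rw [PySem.List.pyRange_one_cons (by omega : c < k)]
    simp only [aInner]
    by_cases hg : (i : Int) + c < (server.length : Int)
    · rw [if_pos hg]
      have hq : ((i : Int) + c).toNat < server.length := by omega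
      have hset : PySem.List.pySetD server ((i : Int) + c) (PySem.List.pyGetD server ((i : Int) + c) 0 + add)
          = server.set ((i : Int) + c).toNat (PySem.List.pyGetD server ((i : Int) + c) 0 + add) :=
        PySem.List.pySetD_of_nonneg server _ (by omega)
      rw [hset]
      obtain ⟨ihlen, ihget⟩ := ih (c + 1) k (by omega) (by omega)
        (server.set ((i : Int) + c).toNat (PySem.List.pyGetD server ((i : Int) + c) 0 + add))
      refine ⟨by simpa using ihlen, fun j => ?_⟩
      rw [ihget j]
      have hv : PySem.List.pyGetD server ((i : Int) + c) 0 = server.getD (((i : Int) + c).toNat) 0 := by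
        rw [PySem.List.pyGetD_of_nonneg server 0 (by omega)]
      have hgd : (server.set ((i : Int) + c).toNat (PySem.List.pyGetD server ((i : Int) + c) 0 + add)).getD j 0
          = if ((i : Int) + c).toNat = j then server.getD (((i : Int) + c).toNat) 0 + add else server.getD j 0 := by
        simp only [List.getD_eq_getElem?_getD, List.getElem?_set, hv]
        split_ifs with h1 <;> simp_all
      rw [hgd]
      simp only [List.length_set]
      by_cases hj : ((i : Int) + c).toNat = j
      · subst hj
        have c1 : ¬((i : Int) + (c + 1) ≤ ((((i : Int) + c).toNat : Nat) : Int) ∧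
            ((((i : Int) + c).toNat : Nat) : Int) < (i : Int) + k ∧ (((i : Int) + c).toNat) < server.length) := by
          rintro ⟨h1, _, _⟩; omega
        have c2 : ((i : Int) + c ≤ ((((i : Int) + c).toNat : Nat) : Int) ∧
            ((((i : Int) + c).toNat : Nat) : Int) < (i : Int) + k ∧ (((i : Int) + c).toNat) < server.length) := by
          refine ⟨by omega, by omega, hq⟩
        rw [if_pos rfl, if_neg c1, if_pos c2]
        ring
      · rw [if_neg hj]
        have heq : ((i : Int) + (c + 1) ≤ (j : Int) ∧ (j : Int) < (i : Int) + k ∧ j < server.length)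
            ↔ ((i : Int) + c ≤ (j : Int) ∧ (j : Int) < (i : Int) + k ∧ j < server.length) := by
          constructor <;> rintro ⟨h1, h2, h3⟩ <;> refine ⟨by omega, h2, h3⟩
        by_cases hcnd : ((i : Int) + c ≤ (j : Int) ∧ (j : Int) < (i : Int) + k ∧ j < server.length)
        · rw [if_pos (heq.mpr hcnd), if_pos hcnd]
        · rw [if_neg (fun h => hcnd (heq.mp h)), if_neg hcnd]
    · rw [if_neg hg]
      refine ⟨rfl, fun j => ?_⟩
      have : ¬((i : Int) + c ≤ (j : Int) ∧ (j : Int) < (i : Int) + k ∧ j < server.length) := by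
        rintro ⟨h1, h2, h3⟩; omega
      simp [this]

lemma main_inv (players : List Int) (m k : Int) :
    ∀ (ps : List Int) (s : Nat) (server diff : List Int) (cur cnt : Int),
    players.drop s = ps →
    server.length = players.length →
    diff.length = players.length + 1 →
    (∀ j : Nat, s ≤ j → j < players.length →
       server.getD j 0 = cur + ((diff.drop s).take (j + 1 - s)).sum) →
    aLoop players m k (PySem.List.pyRange (s : Int) (players.length : Int) 1) server cnt
      = bLoop m k (PySem.List.enumerate ps (s : Int)) diff cur cnt := by
  intro ps
  induction ps with
  | nil =>
    intro s server diff cur cnt hdrop hsl hdl hinv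
    have hsn : players.length ≤ s := by
      by_contra h
      rw [List.drop_eq_getElem_cons (by omega)] at hdrop
      exact List.cons_ne_nil _ _ hdrop
    rw [PySem.List.pyRange_one_eq_nil (by exact_mod_cast hsn)]
    simp [aLoop, bLoop, PySem.List.enumerate]
  | cons p ps' ih =>
    intro s server diff cur cnt hdrop hsl hdl hinv
    have hs : s < players.length := by
      by_contra h
      rw [List.drop_eq_nil_iff.mpr (by omega)] at hdrop
      exact List.cons_ne_nil _ _ hdrop.symm
    have hcons := List.drop_eq_getElem_cons hs
    rw [hdrop] at hcons
    have hp : players[s] = p := by injection hcons with h1 h2; exact h1.symm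
    have hps' : players.drop (s + 1) = ps' := by injection hcons with h1 h2; exact h2.symm
    have hsd : s < diff.length := by omega
    rw [PySem.List.pyRange_one_cons (by exact_mod_cast hs), PySem.List.enumerate_cons]
    simp only [aLoop, bLoop]
    have hpread : PySem.List.pyGetD players (s : Int) 0 = p := by
      rw [PySem.List.pyGetD_natCast]
      simp [List.getD_eq_getElem?_getD, List.getElem?_eq_getElem hs, hp]
    have hdiffread : PySem.List.pyGetD diff (s : Int) 0 = diff.getD s 0 :=
      PySem.List.pyGetD_natCast diff s 0
    have hserverread : PySem.List.pyGetD server (s : Int) 0 = cur + diff.getD s 0 := by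
      rw [PySem.List.pyGetD_natCast]
      have h1 := hinv s le_rfl hs
      rw [sum_take_drop_succ diff s s hsd le_rfl] at h1
      simpa using h1
    rw [hpread, hdiffread, hserverread]
    have hcast : ((s + 1 : Nat) : Int) = (s : Int) + 1 := by push_cast; ring
    have hinv' : ∀ j : Nat, s + 1 ≤ j → j < players.length →
        server.getD j 0 = (cur + diff.getD s 0) + ((diff.drop (s + 1)).take (j + 1 - (s + 1))).sum := by
      intro j hj1 hj2
      rw [hinv j (by omega) hj2, sum_take_drop_succ diff s j hsd (by omega)]
      have : j + 1 - (s + 1) = j - s := by omega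
      rw [this]; ring
    by_cases hm : m ≤ p
    · rw [if_pos hm, if_pos hm]
      by_cases hlt : cur + diff.getD s 0 < PySem.Int.floordiv p m
      · rw [if_pos hlt]
        by_cases hrange : PySem.Int.floordiv p m * m ≤ p ∧ p < (PySem.Int.floordiv p m + 1) * m
        · rw [if_pos hrange, if_pos ⟨hlt, hrange.1, hrange.2⟩]
          by_cases hk : 0 < k
          · rw [if_pos hk]
            obtain ⟨hlen', hget'⟩ := aInner_spec (PySem.Int.floordiv p m - (cur + diff.getD s 0)) s k.toNat 0 k le_rfl (by simp) server
            by_cases hik : (s : Int) + k < (diff.length : Int)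
            · rw [if_pos hik]
              have h0sk : (0 : Int) ≤ (s : Int) + k := by omega
              have hqint : ((((s : Int) + k).toNat : Nat) : Int) = (s : Int) + k := Int.toNat_of_nonneg h0sk
              have hq : ((s : Int) + k).toNat < diff.length := by omega
              have hsetd : PySem.List.pySetD diff ((s : Int) + k)
                    (PySem.List.pyGetD diff ((s : Int) + k) 0 - (PySem.Int.floordiv p m - (cur + diff.getD s 0)))
                  = diff.set (((s : Int) + k).toNat)
                    (diff.getD (((s : Int) + k).toNat) 0 - (PySem.Int.floordiv p m - (cur + diff.getD s 0))) := by
                rw [PySem.List.pyGetD_of_nonneg diff 0 h0sk]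
                exact PySem.List.pySetD_of_nonneg diff _ h0sk
              rw [hsetd]
              have hinv2 : ∀ j : Nat, s + 1 ≤ j → j < players.length →
                  (aInner server (s : Int) (PySem.List.pyRange 0 k 1) (PySem.Int.floordiv p m - (cur + diff.getD s 0))).getD j 0
                    = (cur + diff.getD s 0 + (PySem.Int.floordiv p m - (cur + diff.getD s 0)))
                      + (((diff.set (((s : Int) + k).toNat) (diff.getD (((s : Int) + k).toNat) 0 - (PySem.Int.floordiv p m - (cur + diff.getD s 0)))).drop (s + 1)).take (j + 1 - (s + 1))).sum := by
                intro j hj1 hj2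
                rw [hget' j]
                have hsq : s + 1 ≤ ((s : Int) + k).toNat := by omega
                rw [List.drop_set, if_neg (by omega : ¬(((s : Int) + k).toNat < s + 1))]
                have hple : ((s : Int) + k).toNat - (s + 1) < (diff.drop (s + 1)).length := by
                  rw [List.length_drop]; omega
                rw [sum_take_set _ _ _ _ hple]
                have hgdrop : (diff.drop (s + 1)).getD (((s : Int) + k).toNat - (s + 1)) 0
                    = diff.getD (((s : Int) + k).toNat) 0 := by
                  have harg : s + 1 + (((s : Int) + k).toNat - (s + 1)) = ((s : Int) + k).toNat := by omega
                  simp only [List.getD_eq_getElem?_getD, List.getElem?_drop, harg]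
                rw [hgdrop, hinv' j hj1 hj2]
                have hc1 : ((s : Int) + 0 ≤ (j : Int) ∧ (j : Int) < (s : Int) + k ∧ j < server.length)
                    ↔ j < ((s : Int) + k).toNat := by
                  constructor
                  · rintro ⟨_, h2, _⟩; omega
                  · intro h; refine ⟨by omega, by omega, by omega⟩
                have hc2 : (((s : Int) + k).toNat - (s + 1) < j + 1 - (s + 1))
                    ↔ ¬ (j < ((s : Int) + k).toNat) := by omega
                by_cases hcc : j < ((s : Int) + k).toNat
                · rw [if_pos (hc1.mpr hcc), if_neg (by omega : ¬(((s : Int) + k).toNat - (s + 1) < j + 1 - (s + 1)))]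
                  ring
                · rw [if_neg (fun h => hcc (hc1.mp h)), if_pos (hc2.mpr hcc)]
                  ring
              have step := ih (s + 1)
                (aInner server ((s : Nat) : Int) (PySem.List.pyRange 0 k 1) (PySem.Int.floordiv p m - (cur + diff.getD s 0)))
                (diff.set (((s : Int) + k).toNat) (diff.getD (((s : Int) + k).toNat) 0 - (PySem.Int.floordiv p m - (cur + diff.getD s 0))))
                (cur + diff.getD s 0 + (PySem.Int.floordiv p m - (cur + diff.getD s 0))) (cnt + (PySem.Int.floordiv p m - (cur + diff.getD s 0)))
                hps' (hlen'.trans hsl) (by simp [hdl]) hinv2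
              rw [hcast] at step
              exact step
            · rw [if_neg hik]
              have hinv2 : ∀ j : Nat, s + 1 ≤ j → j < players.length →
                  (aInner server (s : Int) (PySem.List.pyRange 0 k 1) (PySem.Int.floordiv p m - (cur + diff.getD s 0))).getD j 0
                    = (cur + diff.getD s 0 + (PySem.Int.floordiv p m - (cur + diff.getD s 0)))
                      + ((diff.drop (s + 1)).take (j + 1 - (s + 1))).sum := by
                intro j hj1 hj2
                rw [hget' j]
                have hcnd : ((s : Int) + 0 ≤ (j : Int) ∧ (j : Int) < (s : Int) + k ∧ j < server.length) := by
                  refine ⟨by omega, by omega, by omega⟩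
                rw [if_pos hcnd, hinv' j hj1 hj2]
                ring
              have step := ih (s + 1)
                (aInner server ((s : Nat) : Int) (PySem.List.pyRange 0 k 1) (PySem.Int.floordiv p m - (cur + diff.getD s 0)))
                diff (cur + diff.getD s 0 + (PySem.Int.floordiv p m - (cur + diff.getD s 0))) (cnt + (PySem.Int.floordiv p m - (cur + diff.getD s 0)))
                hps' (hlen'.trans hsl) hdl hinv2
              rw [hcast] at step
              exact step
          · rw [if_neg hk]
            rw [PySem.List.pyRange_one_eq_nil (by omega : k ≤ 0)]
            simp only [aInner]
            have step := ih (s + 1) server diff (cur + diff.getD s 0) (cnt + (PySem.Int.floordiv p m - (cur + diff.getD s 0))) hps' hsl hdl hinv'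
            rw [hcast] at step
            exact step
          -- end hk cases
        · rw [if_neg hrange, if_neg (fun h => hrange ⟨h.2.1, h.2.2⟩)]
          have step := ih (s + 1) server diff (cur + diff.getD s 0) cnt hps' hsl hdl hinv'
          rw [hcast] at step
          exact step
      · rw [if_neg hlt, if_neg (fun h => hlt h.1)]
        have step := ih (s + 1) server diff (cur + diff.getD s 0) cnt hps' hsl hdl hinv'
        rw [hcast] at step
        exact step
    · rw [if_neg hm, if_neg hm]
      have step := ih (s + 1) server diff (cur + diff.getD s 0) cnt hps' hsl hdl hinv'
      rw [hcast] at step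
      exact step

-- ===== VERDICT (by name: the statement is the Claim_ definition above) =====
theorem solution_spec : Claim_equal_solution := by
  intro players m k _ _
  unfold Spec_solution solution solution_alt
  have h := main_inv players m k players 0 (List.replicate players.length 0)
    (List.replicate (players.length + 1) 0) 0 0 (by simp) (by simp) (by simp) ?_
  · simpa using h
  · intro j hs hj
    simp [List.getD_eq_getElem?_getD, hj, List.drop_replicate, List.take_replicate]
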